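-- pv_equiv track=rewrite | github.com/TSL-RamKrishna/myproject | scripts/antisense.py | is_antisense
-- ===== SOURCE A (Python) =====
-- def is_antisense(source_positions, target_positions, source_strand, target_strand):
--     # check if source transcript is antisense to target transcript
--     if source_strand != target_strand:  # meaning they are in different strands of dna
--         total = 0
--         for target_exon in target_positions:
--             for source_exon in source_positions:
--                 if source_exon[0] < target_exon[0] < source_exon[1] <= target_exon[1]:
--                     total +=1
--                 elif source_exon[0] <= target_exon[0] < source_exon[1]:
--                     total +=1
--
--         if total == len(source_positions):
--             return True
-- ===== SOURCE B (Python) =====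
-- def _bisect_left(a, x):
--     # index of the first element of sorted list a that is >= x
--     lo = 0
--     hi = len(a)
--     while lo < hi:
--         mid = (lo + hi) // 2
--         if a[mid] < x:
--             lo = mid + 1
--         else:
--             hi = mid
--     return lo
--
--
-- def is_antisense(source_positions, target_positions, source_strand, target_strand):
--     if source_strand == target_strand:
--         return None
--     starts = sorted(t[0] for t in target_positions)
--     total = 0
--     for lo, hi in source_positions:
--         if lo < hi:
--             total += _bisect_left(starts, hi) - _bisect_left(starts, lo)
--     if total == len(source_positions):
--         return True
--     return None
-- ===== Notes on version B (the rewrite author's own statement) =====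
-- stated objective: faster
-- what changed: Replaces A's nested scan over all (target exon, source exon) pairs by sorting the target start points once and, for each source exon, counting the starts inside [start, end) with a hand-rolled binary search (A imports nothing, so bisect is hand-written); correctness rests on A's first branch implying its elif, so each pair counts exactly when source_start <= target_start < source_end.
import Mathlib
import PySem

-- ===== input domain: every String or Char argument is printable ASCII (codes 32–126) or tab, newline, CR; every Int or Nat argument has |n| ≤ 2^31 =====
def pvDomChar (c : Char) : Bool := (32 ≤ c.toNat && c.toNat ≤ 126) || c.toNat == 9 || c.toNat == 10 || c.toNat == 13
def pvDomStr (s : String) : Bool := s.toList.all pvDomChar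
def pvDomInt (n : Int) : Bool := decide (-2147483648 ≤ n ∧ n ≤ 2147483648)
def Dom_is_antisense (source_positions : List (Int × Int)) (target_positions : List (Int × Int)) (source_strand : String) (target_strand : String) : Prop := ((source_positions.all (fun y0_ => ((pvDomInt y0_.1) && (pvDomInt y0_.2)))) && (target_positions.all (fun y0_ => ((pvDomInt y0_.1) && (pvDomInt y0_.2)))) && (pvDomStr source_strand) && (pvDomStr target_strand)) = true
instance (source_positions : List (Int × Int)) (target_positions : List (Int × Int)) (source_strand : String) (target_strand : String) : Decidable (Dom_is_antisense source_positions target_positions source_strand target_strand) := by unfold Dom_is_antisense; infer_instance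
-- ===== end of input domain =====

-- B replaces A's O(n·m) nested scan by sorting the target start points once and counting,
-- per source exon, the starts falling in [start, end) with a hand-written binary search
-- (A imports nothing, so B hand-rolls bisect_left): objective = faster, O((n+m) log m).

-- ===== PORT A =====
def is_antisense (source_positions : List (Int × Int)) (target_positions : List (Int × Int)) (source_strand : String) (target_strand : String) : Option Bool :=
  if source_strand ≠ target_strand then
    let total : Nat := target_positions.foldl (fun total target_exon =>
      source_positions.foldl (fun total source_exon =>
        if source_exon.1 < target_exon.1 ∧ target_exon.1 < source_exon.2 ∧ source_exon.2 ≤ target_exon.2 then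
          total + 1
        else if source_exon.1 ≤ target_exon.1 ∧ target_exon.1 < source_exon.2 then
          total + 1
        else total) total) 0
    if total = source_positions.length then some true else none
  else none

-- ===== PORT B =====
-- transliteration of Source B's `_bisect_left` while-loop (state lo, hi)
def pvBisectLeft (a : List Int) (x : Int) (lo hi : Nat) : Nat :=
  if _h : lo < hi then
    let mid := (lo + hi) / 2
    if a.getD mid 0 < x then pvBisectLeft a x (mid + 1) hi
    else pvBisectLeft a x lo mid
  else lo
termination_by hi - lo
decreasing_by all_goals omega

def is_antisense_alt (source_positions : List (Int × Int)) (target_positions : List (Int × Int)) (source_strand : String) (target_strand : String) : Option Bool :=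
  if source_strand = target_strand then none
  else
    let starts := PySem.List.sorted (target_positions.map Prod.fst) (fun x => x)
    let total : Nat := source_positions.foldl (fun total se =>
      if se.1 < se.2 then
        total + (pvBisectLeft starts se.2 0 starts.length - pvBisectLeft starts se.1 0 starts.length)
      else total) 0
    if total = source_positions.length then some true else none

-- ===== PRECONDITION & SPEC =====
def Spec_is_antisense (source_positions : List (Int × Int)) (target_positions : List (Int × Int)) (source_strand : String) (target_strand : String) (out : Option Bool) : Prop := out = is_antisense_alt source_positions target_positions source_strand target_strand
instance (source_positions : List (Int × Int)) (target_positions : List (Int × Int)) (source_strand : String) (target_strand : String) (out : Option Bool) : Decidable (Spec_is_antisense source_positions target_positions source_strand target_strand out) := by unfold Spec_is_antisense; infer_instance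

-- ===== CLAIM (what is proved, stated in full; the proofs are below) =====
def Claim_equal_is_antisense : Prop := ∀ (source_positions : List (Int × Int)) (target_positions : List (Int × Int)) (source_strand : String) (target_strand : String), Dom_is_antisense source_positions target_positions source_strand target_strand → Spec_is_antisense source_positions target_positions source_strand target_strand (is_antisense source_positions target_positions source_strand target_strand)

-- ===== LEMMAS AND PROOFS =====

-- A's first branch implies its second, so each pair contributes 1 exactly when se.1 ≤ te.1 < se.2
theorem pv_innerA (sp : List (Int × Int)) (te : Int × Int) (n : Nat) :
    sp.foldl (fun total se =>
        if se.1 < te.1 ∧ te.1 < se.2 ∧ se.2 ≤ te.2 then total + 1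
        else if se.1 ≤ te.1 ∧ te.1 < se.2 then total + 1
        else total) n
      = n + sp.countP (fun se => decide (se.1 ≤ te.1 ∧ te.1 < se.2)) := by
  induction sp generalizing n with
  | nil => simp
  | cons se t ih =>
    rw [List.foldl_cons, ih, List.countP_cons]
    simp only [decide_eq_true_eq]
    split_ifs <;> omega

theorem pv_outerA (tp sp : List (Int × Int)) (n : Nat) :
    tp.foldl (fun total te =>
        sp.foldl (fun total se =>
          if se.1 < te.1 ∧ te.1 < se.2 ∧ se.2 ≤ te.2 then total + 1
          else if se.1 ≤ te.1 ∧ te.1 < se.2 then total + 1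
          else total) total) n
      = n + (tp.map (fun te => sp.countP (fun se => decide (se.1 ≤ te.1 ∧ te.1 < se.2)))).sum := by
  induction tp generalizing n with
  | nil => simp
  | cons te t ih =>
    rw [List.foldl_cons, pv_innerA, ih, List.map_cons, List.sum_cons]
    omega

theorem pv_sum_map_add {α : Type} (l : List α) (f g : α → Nat) :
    (l.map (fun x => f x + g x)).sum = (l.map f).sum + (l.map g).sum := by
  induction l with
  | nil => simp
  | cons a t ih => simp [ih]; omega

theorem pv_sum_swap {α β : Type} (l1 : List α) (l2 : List β) (g : α → β → Nat) :
    (l1.map (fun a => (l2.map (g a)).sum)).sum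
      = (l2.map (fun b => (l1.map (fun a => g a b)).sum)).sum := by
  induction l1 with
  | nil => simp
  | cons a t ih =>
    simp only [List.map_cons, List.sum_cons, ih, pv_sum_map_add]

theorem pv_countP_sum {α : Type} (l : List α) (p : α → Bool) :
    l.countP p = (l.map (fun x => if p x then 1 else 0)).sum := by
  induction l with
  | nil => simp
  | cons a t ih => simp [List.countP_cons, ih]; omega

-- in a ≤-sorted list, a[i] < x  iff  i is below the count of elements < x
theorem pv_cp_char (a : List Int) (x : Int) (hs : a.Pairwise (· ≤ ·)) :
    ∀ i (h : i < a.length), (a[i] < x ↔ i < a.countP (fun y => decide (y < x))) := by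
  induction a with
  | nil => intro i h; simp at h
  | cons y t ih =>
    intro i h
    rcases List.pairwise_cons.mp hs with ⟨hy, ht⟩
    by_cases hx : y < x
    · have hd : (decide (y < x)) = true := by simpa using hx
      cases i with
      | zero =>
        simp only [List.getElem_cons_zero, List.countP_cons, hd, if_true]
        omega
      | succ j =>
        have hj : j < t.length := by simpa using h
        have hih := ih ht j hj
        simp only [List.getElem_cons_succ, List.countP_cons, hd, if_true]
        rw [hih]
        omega
    · have hd : (decide (y < x)) = false := by simpa using hx
      have hz : t.countP (fun y => decide (y < x)) = 0 := by
        apply List.countP_eq_zero.mpr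
        intro z hzm
        simp only [decide_eq_true_eq]
        have := hy z hzm
        omega
      cases i with
      | zero =>
        simp only [List.getElem_cons_zero, List.countP_cons, hd, Bool.false_eq_true, if_false, hz]
        omega
      | succ j =>
        have hj : j < t.length := by simpa using h
        have hyz : y ≤ t[j] := hy _ (List.getElem_mem hj)
        simp only [List.getElem_cons_succ, List.countP_cons, hd, Bool.false_eq_true, if_false, hz]
        omega

theorem pv_bl_eq (a : List Int) (x : Int) (hs : a.Pairwise (· ≤ ·)) :
    ∀ d lo hi, hi - lo ≤ d → lo ≤ a.countP (fun y => decide (y < x)) →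
      a.countP (fun y => decide (y < x)) ≤ hi → hi ≤ a.length →
      pvBisectLeft a x lo hi = a.countP (fun y => decide (y < x)) := by
  intro d
  induction d with
  | zero =>
    intro lo hi hd h1 h2 h3
    rw [pvBisectLeft]
    have : ¬ lo < hi := by omega
    simp only [this, dite_false]
    omega
  | succ d ih =>
    intro lo hi hd h1 h2 h3
    rw [pvBisectLeft]
    split
    · next hlt =>
      simp only
      have hmid : (lo + hi) / 2 < a.length := by omega
      rw [List.getD_eq_getElem a 0 hmid]
      have hchar := pv_cp_char a x hs ((lo + hi) / 2) hmid
      split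
      · next hcond =>
        have : (lo + hi) / 2 < a.countP (fun y => decide (y < x)) := hchar.mp hcond
        exact ih ((lo + hi) / 2 + 1) hi (by omega) (by omega) h2 h3
      · next hcond =>
        have : ¬ ((lo + hi) / 2 < a.countP (fun y => decide (y < x))) := fun hh => hcond (hchar.mpr hh)
        exact ih lo ((lo + hi) / 2) (by omega) h1 (by omega) (by omega)
    · next hge => omega

theorem pv_bl_full (a : List Int) (x : Int) (hs : a.Pairwise (· ≤ ·)) :
    pvBisectLeft a x 0 a.length = a.countP (fun y => decide (y < x)) := by
  have hle := List.countP_le_length (p := fun y => decide (y < x)) (l := a)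
  exact pv_bl_eq a x hs a.length 0 a.length (by omega) (by omega) hle le_rfl

theorem pv_cp_split (l : List Int) (a b : Int) (hab : a ≤ b) :
    l.countP (fun y => decide (y < b))
      = l.countP (fun y => decide (y < a)) + l.countP (fun y => decide (a ≤ y ∧ y < b)) := by
  induction l with
  | nil => simp
  | cons z t ih =>
    simp only [List.countP_cons, ih, decide_eq_true_eq]
    split_ifs <;> omega

theorem pv_foldlB (sp : List (Int × Int)) (c : Int × Int → Nat) (n : Nat) :
    sp.foldl (fun total se => if se.1 < se.2 then total + c se else total) n
      = n + (sp.map (fun se => if se.1 < se.2 then c se else 0)).sum := by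
  induction sp generalizing n with
  | nil => simp
  | cons se t ih =>
    simp only [List.foldl_cons, List.map_cons, List.sum_cons, ih]
    split_ifs <;> omega

theorem pv_starts_pairwise (tp : List (Int × Int)) :
    (PySem.List.sorted (tp.map Prod.fst) (fun x => x)).Pairwise (· ≤ ·) :=
  PySem.List.sorted_pairwise (tp.map Prod.fst) (fun x => x)

theorem pv_per_se (tp : List (Int × Int)) (se : Int × Int) :
    (if se.1 < se.2 then
        pvBisectLeft (PySem.List.sorted (tp.map Prod.fst) (fun x => x)) se.2 0
            (PySem.List.sorted (tp.map Prod.fst) (fun x => x)).length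
          - pvBisectLeft (PySem.List.sorted (tp.map Prod.fst) (fun x => x)) se.1 0
            (PySem.List.sorted (tp.map Prod.fst) (fun x => x)).length
      else 0)
      = tp.countP (fun te => decide (se.1 ≤ te.1 ∧ te.1 < se.2)) := by
  have hperm := PySem.List.sorted_perm (tp.map Prod.fst) (fun x => x) false
  split
  · next hlt =>
    rw [pv_bl_full _ _ (pv_starts_pairwise tp), pv_bl_full _ _ (pv_starts_pairwise tp)]
    rw [hperm.countP_eq, hperm.countP_eq]
    rw [pv_cp_split (tp.map Prod.fst) se.1 se.2 (le_of_lt hlt)]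
    simp only [Nat.add_sub_cancel_left, List.countP_map]
    rfl
  · next hge =>
    symm
    apply List.countP_eq_zero.mpr
    intro te _
    simp only [decide_eq_true_eq]
    omega

theorem pv_totals_eq (sp tp : List (Int × Int)) :
    tp.foldl (fun total te =>
        sp.foldl (fun total se =>
          if se.1 < te.1 ∧ te.1 < se.2 ∧ se.2 ≤ te.2 then total + 1
          else if se.1 ≤ te.1 ∧ te.1 < se.2 then total + 1
          else total) total) 0
      = sp.foldl (fun total se =>
          if se.1 < se.2 then
            total + (pvBisectLeft (PySem.List.sorted (tp.map Prod.fst) (fun x => x)) se.2 0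
                (PySem.List.sorted (tp.map Prod.fst) (fun x => x)).length
              - pvBisectLeft (PySem.List.sorted (tp.map Prod.fst) (fun x => x)) se.1 0
                (PySem.List.sorted (tp.map Prod.fst) (fun x => x)).length)
          else total) 0 := by
  rw [pv_outerA, pv_foldlB]
  simp only [Nat.zero_add]
  calc (tp.map (fun te => sp.countP (fun se => decide (se.1 ≤ te.1 ∧ te.1 < se.2)))).sum
      = (tp.map (fun te => (sp.map (fun se => if decide (se.1 ≤ te.1 ∧ te.1 < se.2) then 1 else 0)).sum)).sum := by
        simp only [pv_countP_sum]
    _ = (sp.map (fun se => (tp.map (fun te => if decide (se.1 ≤ te.1 ∧ te.1 < se.2) then 1 else 0)).sum)).sum := by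
        exact pv_sum_swap tp sp (fun te se => if decide (se.1 ≤ te.1 ∧ te.1 < se.2) then 1 else 0)
    _ = (sp.map (fun se => tp.countP (fun te => decide (se.1 ≤ te.1 ∧ te.1 < se.2)))).sum := by
        simp only [pv_countP_sum]
    _ = _ := by
        apply congrArg
        apply List.map_congr_left
        intro se _
        exact (pv_per_se tp se).symm

-- ===== VERDICT (by name: the statement is the Claim_ definition above) =====
theorem is_antisense_spec : Claim_equal_is_antisense := by
  intro sp tp ss ts _
  unfold Spec_is_antisense is_antisense is_antisense_alt
  by_cases h : ss = ts
  · simp [h]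
  · simp only [h, ne_eq, not_false_eq_true, if_true, if_false]
    rw [pv_totals_eq sp tp]
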